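-- pv_equiv track=rewrite | github.com/aaron-mcbride/tal_svd_parser | svd_parser2.py | diff_start_digit
-- ===== SOURCE A (Python) =====
-- def diff_start_digit(text1: str, text2: str):
--     if text1[0].isdigit() and text2[0].isdigit():
--         for i in range(max(len(text1), len(text2))):
--             c1 = None if i >= len(text1) else text1[i]
--             c2 = None if i >= len(text2) else text2[i]
--             if (c1 is not None and c1.isdigit()) or (c2 is not None and c2.isdigit()):
--                 if c1 != c2:
--                     return True
--             else:
--                 return False
--     return False
-- ===== SOURCE B (Python) =====
-- def _digit_prefix(s):
--     out = []
--     for c in s: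
--         if not c.isdigit():
--             break
--         out.append(c)
--     return ''.join(out)
--
--
-- def diff_start_digit(text1: str, text2: str):
--     if text1[0].isdigit() and text2[0].isdigit():
--         return _digit_prefix(text1) != _digit_prefix(text2)
--     return False
-- ===== Notes on version B (the rewrite author's own statement) =====
-- stated objective: simpler
-- what changed: Replaces A's single index loop over max(len1,len2) with Optional sentinels and interleaved early returns by extracting each string's leading digit prefix separately and comparing the two prefixes for inequality.
import Mathlib
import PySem

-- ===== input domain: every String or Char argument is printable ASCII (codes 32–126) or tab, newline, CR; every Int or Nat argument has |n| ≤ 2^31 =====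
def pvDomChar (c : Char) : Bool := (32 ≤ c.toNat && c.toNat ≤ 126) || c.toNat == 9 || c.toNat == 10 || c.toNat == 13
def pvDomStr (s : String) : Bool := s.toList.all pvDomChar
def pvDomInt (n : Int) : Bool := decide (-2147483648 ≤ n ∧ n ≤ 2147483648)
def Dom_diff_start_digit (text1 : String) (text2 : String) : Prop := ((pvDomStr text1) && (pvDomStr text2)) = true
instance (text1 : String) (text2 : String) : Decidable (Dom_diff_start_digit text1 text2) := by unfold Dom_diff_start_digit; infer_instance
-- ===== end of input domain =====

-- B replaces A's single index loop (with None sentinels past each end) by comparing the two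
-- leading digit prefixes, extracted independently; objective: simpler.

-- ===== PORT A =====
-- one iteration of A's loop body: some b = 'return b', none = continue to next i
def pvStepA (c1 c2 : Option Char) : Option Bool :=
  if c1.any PySem.Chars.isdigit || c2.any PySem.Chars.isdigit then
    if c1 ≠ c2 then some true else none
  else some false

-- A's 'for i in range(max(len1, len2))' loop: c1/c2 are the current chars (none past the end);
-- reaching the end of the range without returning gives the function's final 'return False'
def pvLoopATail1 : List Char → Bool
  | [] => false
  | c1 :: t1 =>
    match pvStepA (some c1) none with
    | some b => b
    | none => pvLoopATail1 t1

def pvLoopATail2 : List Char → Bool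
  | [] => false
  | c2 :: t2 =>
    match pvStepA none (some c2) with
    | some b => b
    | none => pvLoopATail2 t2

def pvLoopA : List Char → List Char → Bool
  | [], l2 => pvLoopATail2 l2
  | l1, [] => pvLoopATail1 l1
  | c1 :: t1, c2 :: t2 =>
    match pvStepA (some c1) (some c2) with
    | some b => b
    | none => pvLoopA t1 t2

def diff_start_digit (text1 : String) (text2 : String) : Bool :=
  match PySem.Str.pyGet? text1 0 with
  | none => false   -- Python raises IndexError here; excluded by Pre_
  | some c1 =>
    if PySem.Chars.isdigit c1 then
      match PySem.Str.pyGet? text2 0 with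
      | none => false   -- Python raises IndexError here; excluded by Pre_
      | some c2 =>
        if PySem.Chars.isdigit c2 then pvLoopA text1.toList text2.toList
        else false
    else false

-- ===== PORT B =====
def pvDigitPrefix : List Char → List Char
  | [] => []
  | c :: cs => if PySem.Chars.isdigit c then c :: pvDigitPrefix cs else []

def diff_start_digit_alt (text1 : String) (text2 : String) : Bool :=
  match PySem.Str.pyGet? text1 0 with
  | none => false   -- Python raises IndexError here; excluded by Pre_
  | some c1 =>
    if PySem.Chars.isdigit c1 then
      match PySem.Str.pyGet? text2 0 with
      | none => false   -- Python raises IndexError here; excluded by Pre_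
      | some c2 =>
        if PySem.Chars.isdigit c2 then
          !(pvDigitPrefix text1.toList == pvDigitPrefix text2.toList)
        else false
    else false

-- ===== PRECONDITION & SPEC =====
-- Pre_ excludes exactly where A raises IndexError: empty text1, and empty text2 when text1 starts with a digit
def Pre_diff_start_digit (text1 : String) (text2 : String) : Prop :=
  text1.toList ≠ [] ∧ (text1.toList.head?.any PySem.Chars.isdigit = true → text2.toList ≠ [])
instance (text1 : String) (text2 : String) : Decidable (Pre_diff_start_digit text1 text2) := by
  unfold Pre_diff_start_digit; infer_instance

def pvWitness_diff_start_digit : String × String := ("12a", "13b")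

def Spec_diff_start_digit (text1 : String) (text2 : String) (out : Bool) : Prop := out = diff_start_digit_alt text1 text2
instance (text1 : String) (text2 : String) (out : Bool) : Decidable (Spec_diff_start_digit text1 text2 out) := by unfold Spec_diff_start_digit; infer_instance

-- ===== CLAIM (what is proved, stated in full; the proofs are below) =====
def Claim_equal_diff_start_digit : Prop := ∀ (text1 : String) (text2 : String), Dom_diff_start_digit text1 text2 → Pre_diff_start_digit text1 text2 → Spec_diff_start_digit text1 text2 (diff_start_digit text1 text2)

-- ===== LEMMAS AND PROOFS =====

-- A's loop decides exactly whether the two leading digit prefixes differ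
theorem pvLoopATail2_eq (l2 : List Char) :
    pvLoopATail2 l2 = !(([] : List Char) == pvDigitPrefix l2) := by
  cases l2 with
  | nil => simp [pvLoopATail2, pvDigitPrefix]
  | cons c2 t2 =>
    by_cases h : PySem.Chars.isdigit c2 = true <;>
      simp [pvLoopATail2, pvStepA, pvDigitPrefix, h]

theorem pvLoopATail1_eq (l1 : List Char) :
    pvLoopATail1 l1 = !(pvDigitPrefix l1 == ([] : List Char)) := by
  cases l1 with
  | nil => simp [pvLoopATail1, pvDigitPrefix]
  | cons c1 t1 =>
    by_cases h : PySem.Chars.isdigit c1 = true <;>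
      simp [pvLoopATail1, pvStepA, pvDigitPrefix, h]

theorem pvLoopA_eq (l1 l2 : List Char) :
    pvLoopA l1 l2 = !(pvDigitPrefix l1 == pvDigitPrefix l2) := by
  induction l1 generalizing l2 with
  | nil => simpa [pvLoopA, pvDigitPrefix] using pvLoopATail2_eq l2
  | cons c1 t1 ih =>
    cases l2 with
    | nil => simpa [pvLoopA, pvDigitPrefix] using pvLoopATail1_eq (c1 :: t1)
    | cons c2 t2 =>
      by_cases hd : c1 = c2
      · subst hd
        by_cases h : PySem.Chars.isdigit c1 = true <;>
          simp [pvLoopA, pvStepA, pvDigitPrefix, h, ih t2]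
      · by_cases h1 : PySem.Chars.isdigit c1 = true <;>
          by_cases h2 : PySem.Chars.isdigit c2 = true <;>
            simp [pvLoopA, pvStepA, pvDigitPrefix, h1, h2, hd]

-- ===== VERDICT (by name: the statement is the Claim_ definition above) =====
theorem diff_start_digit_spec : Claim_equal_diff_start_digit := by
  intro text1 text2 _ _
  unfold Spec_diff_start_digit diff_start_digit diff_start_digit_alt
  cases PySem.Str.pyGet? text1 0 with
  | none => rfl
  | some c1 =>
    by_cases h1 : PySem.Chars.isdigit c1 = true
    · simp only [h1, if_true]
      cases PySem.Str.pyGet? text2 0 with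
      | none => rfl
      | some c2 =>
        by_cases h2 : PySem.Chars.isdigit c2 = true
        · simp only [h2, if_true]; exact pvLoopA_eq _ _
        · simp [h2]
    · simp [h1]
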